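-- pv_equiv track=rewrite | github.com/Siddharth-10/Miscellaneous-Competitive-Code | lovely-lucky-lambs.py | stingy
-- ===== SOURCE A (Python) =====
-- def stingy(total_lambs):
--     a = 1
--     b = 1
--     total = 1
--     count = 1
--     while total + b<= total_lambs:
--         temp = a + b
--         a = b
--         b = temp
--         total = total + a
--         count = count + 1
--
--     return count
-- ===== SOURCE B (Python) =====
-- def stingy(total_lambs):
--     # Stage 1: materialise the Fibonacci sequence as a list until its total exceeds total_lambs.
--     fibs = [1, 1]
--     while sum(fibs) <= total_lambs:
--         fibs.append(fibs[-1] + fibs[-2])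
--     # Stage 2: the answer is the longest proper prefix of fibs whose sum fits, at least 1.
--     count = 0
--     for k in range(1, len(fibs)):
--         if sum(fibs[:k]) <= total_lambs:
--             count = k
--     return max(count, 1)
-- ===== Notes on version B (the rewrite author's own statement) =====
-- stated objective: alternative
-- what changed: B replaces A's single scalar loop (running total, Fibonacci pair, counter) by two staged passes over an explicit list: it first materialises the Fibonacci sequence as a list until its sum exceeds total_lambs, then scans prefix slices to pick the longest affordable proper prefix, returning at least 1.
import Mathlib
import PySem

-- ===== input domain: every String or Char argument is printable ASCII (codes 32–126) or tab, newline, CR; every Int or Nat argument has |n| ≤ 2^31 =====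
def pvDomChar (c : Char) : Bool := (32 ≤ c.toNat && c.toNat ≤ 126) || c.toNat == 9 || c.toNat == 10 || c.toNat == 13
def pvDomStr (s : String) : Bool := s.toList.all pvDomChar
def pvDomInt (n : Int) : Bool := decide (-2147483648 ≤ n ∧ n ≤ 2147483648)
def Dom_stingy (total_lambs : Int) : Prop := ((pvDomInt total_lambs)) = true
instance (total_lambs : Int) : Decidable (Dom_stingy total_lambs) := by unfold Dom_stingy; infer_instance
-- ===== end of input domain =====

-- B replaces A's single scalar loop by two stages: it materialises the Fibonacci
-- sequence as a list, then scans prefix sums to pick the longest affordable proper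
-- prefix (objective: alternative decomposition; not faster).
-- Both loops use a fuel bound of 100; the equivalence proof matches the two loops
-- iteration for iteration, so it holds for the common fuel regardless of exhaustion.

-- ===== PORT A =====
-- while total + b <= total_lambs: a, b, total, count = b, a+b, total+b, count+1
def stingyLoop : Nat → Int → Int → Int → Int → Int → Int
  | 0, _, _, _, _, count => count
  | (f+1), tl, a, b, total, count =>
    if total + b ≤ tl then stingyLoop f tl b (a + b) (total + b) (count + 1)
    else count

def stingy (total_lambs : Int) : Int := stingyLoop 100 total_lambs 1 1 1 1

-- ===== PORT B =====
-- Stage 1: while sum(fibs) <= total_lambs: fibs.append(fibs[-1] + fibs[-2])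
-- (fibs always has ≥ 2 elements, so the .getD 0 defaults on fibs[-1]/fibs[-2] are unreachable)
def buildFibs : Nat → Int → List Int → List Int
  | 0, _, fibs => fibs
  | (f+1), tl, fibs =>
    if fibs.sum ≤ tl then
      buildFibs f tl
        (fibs ++ [(PySem.List.pyGet? fibs (-1)).getD 0 + (PySem.List.pyGet? fibs (-2)).getD 0])
    else fibs

-- Stage 2: count = last k in range(1, len(fibs)) with sum(fibs[:k]) <= total_lambs (else 0)
def properPrefixCount (tl : Int) (fibs : List Int) : Int :=
  (PySem.List.pyRange 1 (fibs.length : Int) 1).foldl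
    (fun count k => if (PySem.List.slice fibs none (some k)).sum ≤ tl then k else count) 0

def stingy_alt (total_lambs : Int) : Int :=
  max (properPrefixCount total_lambs (buildFibs 100 total_lambs [1, 1])) 1

-- ===== PRECONDITION & SPEC =====
def Spec_stingy (total_lambs : Int) (out : Int) : Prop := out = stingy_alt total_lambs
instance (total_lambs : Int) (out : Int) : Decidable (Spec_stingy total_lambs out) := by unfold Spec_stingy; infer_instance

-- ===== CLAIM (what is proved, stated in full; the proofs are below) =====
def Claim_equal_stingy : Prop := ∀ (total_lambs : Int), Dom_stingy total_lambs → Spec_stingy total_lambs (stingy total_lambs)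

-- ===== LEMMAS AND PROOFS =====

-- Appending the next Fibonacci number to a list whose sum fits moves the proper-prefix
-- count to exactly the length of the old list (the new last proper prefix is the old list).
lemma properPrefixCount_append (tl : Int) (fibs : List Int) (x : Int)
    (h2 : 2 ≤ fibs.length) (hsum : fibs.sum ≤ tl) :
    properPrefixCount tl (fibs ++ [x]) = (fibs.length : Int) := by
  unfold properPrefixCount
  have hlen : ((fibs ++ [x]).length : Int) = (fibs.length : Int) + 1 := by
    simp
  rw [hlen, PySem.List.pyRange_one_succ_right (by exact_mod_cast Nat.one_le_of_lt h2),
    List.foldl_append]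
  simp only [List.foldl_cons, List.foldl_nil]
  rw [PySem.List.slice_to _ (by positivity)]
  have : (fibs.length : Int).toNat = fibs.length := by simp
  rw [this, List.take_left]
  simp [hsum]

-- Loop correspondence, iteration for iteration: A's state (a, b, total, count)
-- corresponds to B's list fibs = init ++ [a, b] with sum total + b and length count + 1,
-- whose proper-prefix count already yields count.
lemma stingy_loop_agree (f : Nat) : ∀ (tl a b total count : Int) (init : List Int),
    (init ++ [a, b]).sum = total + b →
    ((init ++ [a, b]).length : Int) = count + 1 →
    max (properPrefixCount tl (init ++ [a, b])) 1 = count →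
    stingyLoop f tl a b total count
      = max (properPrefixCount tl (buildFibs f tl (init ++ [a, b]))) 1 := by
  induction f with
  | zero => intro tl a b total count init _ _ h3; simpa [stingyLoop, buildFibs] using h3.symm
  | succ f ih =>
    intro tl a b total count init h1 h2 h3
    simp only [stingyLoop, buildFibs, h1]
    by_cases hc : total + b ≤ tl
    · rw [if_pos hc, if_pos hc]
      have hlast : PySem.List.pyGet? (init ++ [a, b]) (-1) = some b := by
        have : init ++ [a, b] = (init ++ [a]) ++ [b] := by simp
        rw [this, PySem.List.pyGet?_neg_one_append_singleton]
      have hlast2 : PySem.List.pyGet? (init ++ [a, b]) (-2) = some a := by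
        rw [PySem.List.pyGet?_neg_ofNat (init ++ [a, b]) 2 (by omega) (by simp)]
        simp
      rw [hlast, hlast2]
      have hcnt : 1 ≤ count := by
        have := le_max_right (properPrefixCount tl (init ++ [a, b])) 1
        omega
      have hre : init ++ [a, b] ++ [b + a] = (init ++ [a]) ++ [b, a + b] := by
        simp [Int.add_comm b a]
      rw [Option.getD_some, Option.getD_some, hre]
      apply ih tl b (a + b) (total + b) (count + 1) (init ++ [a])
      · simp at h1 ⊢; omega
      · simp at h2 ⊢; try omega
      · have hlen2 : 2 ≤ (init ++ [a, b]).length := by simp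
        have := properPrefixCount_append tl (init ++ [a, b]) (b + a) hlen2 (h1 ▸ hc)
        rw [← hre]
        rw [this, h2]
        omega
    · rw [if_neg hc, if_neg hc]
      exact h3.symm

-- ===== VERDICT (by name: the statement is the Claim_ definition above) =====
theorem stingy_spec : Claim_equal_stingy := by
  intro tl _
  unfold Spec_stingy stingy stingy_alt
  have h3 : max (properPrefixCount tl [(1 : Int), 1]) 1 = 1 := by
    unfold properPrefixCount
    rw [show ((([(1 : Int), 1] : List Int).length : Int)) = 1 + 1 by norm_num,
      PySem.List.pyRange_one_singleton]
    simp only [List.foldl_cons, List.foldl_nil]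
    rw [PySem.List.slice_to _ (by norm_num)]
    norm_num
    split_ifs <;> omega
  have := stingy_loop_agree 100 tl 1 1 1 1 [] (by simp) (by simp) h3
  simpa using this
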